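-- pv_equiv track=rewrite | github.com/hpfref/GameAI-JumpSturdy | src/neural_network.py | encode_board_state
-- ===== SOURCE A (Python) =====
-- def encode_board_state(board_state_str):
--     piece_to_int = {'b': 1, 'bb': 2, 'rb': 3, 'r': 4, 'rr': 5, 'br': 6}
--     board_encoded = []
--     board_state_str = board_state_str[:-2].replace('/', '')
--     i = 0
--     while i < len(board_state_str):
--         if i < len(board_state_str) - 1 and board_state_str[i:i+2] in piece_to_int:
--             board_encoded.append(piece_to_int[board_state_str[i:i+2]])
--             i += 2
--         elif board_state_str[i] in piece_to_int:
--             board_encoded.append(piece_to_int[board_state_str[i]])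
--             i += 1
--         else:
--             board_encoded.extend([0] * int(board_state_str[i]))
--             i += 1
--     return board_encoded
-- ===== SOURCE B (Python) =====
-- def encode_board_state(board_state_str):
--     piece_to_int = {'b': 1, 'bb': 2, 'rb': 3, 'r': 4, 'rr': 5, 'br': 6}
--     board_encoded = []
--     pending = ''
--     for c in board_state_str[:-2].replace('/', ''):
--         if c in ('b', 'r'):
--             if pending:
--                 board_encoded.append(piece_to_int[pending + c])
--                 pending = ''
--             else:
--                 pending = c
--         else:
--             if pending:
--                 board_encoded.append(piece_to_int[pending])
--                 pending = ''
--             board_encoded.extend([0] * int(c))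
--     if pending:
--         board_encoded.append(piece_to_int[pending])
--     return board_encoded
-- ===== Notes on version B (the rewrite author's own statement) =====
-- stated objective: alternative
-- what changed: Replaces A's index-based scan with two-character lookahead slicing and dict membership tests by a single left-to-right fold over the characters that carries a pending half-read piece character and flushes it when the next character resolves it, with a final flush after the loop.
import Mathlib
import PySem

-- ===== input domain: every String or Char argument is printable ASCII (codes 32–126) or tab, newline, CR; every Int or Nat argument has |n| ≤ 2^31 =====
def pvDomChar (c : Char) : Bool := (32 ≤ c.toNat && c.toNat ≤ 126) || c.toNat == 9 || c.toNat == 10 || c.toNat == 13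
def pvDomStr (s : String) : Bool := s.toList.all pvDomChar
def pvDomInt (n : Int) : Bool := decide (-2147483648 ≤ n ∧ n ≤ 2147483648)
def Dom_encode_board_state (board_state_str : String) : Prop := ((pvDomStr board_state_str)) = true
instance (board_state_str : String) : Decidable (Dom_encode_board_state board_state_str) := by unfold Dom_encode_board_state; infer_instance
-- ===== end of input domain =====

-- B replaces A's index-based greedy scan (two-character slice + dict membership lookahead) by a single
-- fold over the characters carrying a pending half-read piece character, flushed by the next character
-- or after the loop; same O(n) cost, different decomposition.

-- ===== PORT A =====
-- piece_to_int, the literal table both Pythons declare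
def pieceToInt : PySem.Dict String Int :=
  PySem.Dict.ofList [("b", 1), ("bb", 2), ("rb", 3), ("r", 4), ("rr", 5), ("br", 6)]

-- A's while-loop over index i, transcribed as structural recursion on the remaining suffix;
-- none = the ValueError of int(board_state_str[i]) on a non-digit character.
def encLoopA : List Char → Option (List Int)
  | [] => some []
  | [c] =>
    match pieceToInt.get? (String.ofList [c]) with
    | some v => (encLoopA []).map (v :: ·)
    | none =>
      (PySem.Int.ofStr? (String.ofList [c])).bind fun n =>
        (encLoopA []).map (List.replicate n.toNat 0 ++ ·)
  | c :: c2 :: rest2 =>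
    match pieceToInt.get? (String.ofList [c, c2]) with
    | some v => (encLoopA rest2).map (v :: ·)
    | none =>
      match pieceToInt.get? (String.ofList [c]) with
      | some v => (encLoopA (c2 :: rest2)).map (v :: ·)
      | none =>
        (PySem.Int.ofStr? (String.ofList [c])).bind fun n =>
          (encLoopA (c2 :: rest2)).map (List.replicate n.toNat 0 ++ ·)

def encode_board_state (board_state_str : String) : List Int :=
  (encLoopA (PySem.Chars.replace (PySem.Chars.slice board_state_str.toList none (some (-2))) ['/'] [])).getD []

-- ===== PORT B =====
-- B's loop body: state = (board_encoded, pending); none = a raised exception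
def encStepB (st : Option (List Int × Option Char)) (c : Char) : Option (List Int × Option Char) :=
  match st with
  | none => none
  | some (out, pending) =>
    if c == 'b' || c == 'r' then
      match pending with
      | some p => (pieceToInt.get? (String.ofList [p, c])).map (fun v => (out ++ [v], none))
      | none => some (out, some c)
    else
      match pending with
      | some p =>
        (pieceToInt.get? (String.ofList [p])).bind fun v =>
          (PySem.Int.ofStr? (String.ofList [c])).map fun n =>
            (out ++ [v] ++ List.replicate n.toNat 0, none)
      | none =>
        (PySem.Int.ofStr? (String.ofList [c])).map fun n =>
          (out ++ List.replicate n.toNat 0, none)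

-- B's final flush of the pending piece
def encFinishB (st : Option (List Int × Option Char)) : Option (List Int) :=
  match st with
  | none => none
  | some (out, none) => some out
  | some (out, some p) => (pieceToInt.get? (String.ofList [p])).map (fun v => out ++ [v])

def encode_board_state_alt (board_state_str : String) : List Int :=
  (encFinishB ((PySem.Chars.replace (PySem.Chars.slice board_state_str.toList none (some (-2))) ['/'] []).foldl
      encStepB (some ([], none)))).getD []

-- ===== PRECONDITION & SPEC =====
-- Pre_ excludes exactly the inputs on which Python A raises ValueError: a character of the
-- preprocessed board (last two chars dropped, slashes removed) that is neither a piece character nor a digit.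
def Pre_encode_board_state (board_state_str : String) : Prop :=
  ((PySem.Chars.replace (PySem.Chars.slice board_state_str.toList none (some (-2))) ['/'] []).all
    (fun c => c == 'b' || c == 'r' || c.isDigit)) = true
instance (board_state_str : String) : Decidable (Pre_encode_board_state board_state_str) := by
  unfold Pre_encode_board_state; infer_instance

def pvWitness_encode_board_state : String := "b0b2/1bb1r1/2r3/6/6/6 r"

def Spec_encode_board_state (board_state_str : String) (out : List Int) : Prop := out = encode_board_state_alt board_state_str
instance (board_state_str : String) (out : List Int) : Decidable (Spec_encode_board_state board_state_str out) := by unfold Spec_encode_board_state; infer_instance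

-- ===== CLAIM (what is proved, stated in full; the proofs are below) =====
def Claim_equal_encode_board_state : Prop := ∀ (board_state_str : String), Dom_encode_board_state board_state_str → Pre_encode_board_state board_state_str → Spec_encode_board_state board_state_str (encode_board_state board_state_str)

-- ===== LEMMAS AND PROOFS =====

theorem pieceToInt_eq_mk : pieceToInt = PySem.Dict.mk [("b", 1), ("bb", 2), ("rb", 3), ("r", 4), ("rr", 5), ("br", 6)] := by decide

-- lookup in the literal table, characterised on the char list of the key
theorem get?_ofList (s : List Char) :
    pieceToInt.get? (String.ofList s) =
      if s = ['b'] then some 1 else if s = ['b','b'] then some 2 else if s = ['r','b'] then some 3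
      else if s = ['r'] then some 4 else if s = ['r','r'] then some 5 else if s = ['b','r'] then some 6
      else none := by
  rw [pieceToInt_eq_mk]
  simp only [PySem.Dict.get?_mk_cons, Bool.beq_eq_decide_eq,
    show ("b":String) = String.ofList ['b'] from rfl, show ("bb":String) = String.ofList ['b','b'] from rfl,
    show ("rb":String) = String.ofList ['r','b'] from rfl, show ("r":String) = String.ofList ['r'] from rfl,
    show ("rr":String) = String.ofList ['r','r'] from rfl, show ("br":String) = String.ofList ['b','r'] from rfl,
    String.ofList_inj]
  simp only [PySem.Dict.get?]
  split_ifs with h1 h2 h3 h4 h5 h6 <;> simp_all [eq_comm]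

theorem get?_b : pieceToInt.get? "b" = some 1 := by decide
theorem get?_bb : pieceToInt.get? "bb" = some 2 := by decide
theorem get?_rb : pieceToInt.get? "rb" = some 3 := by decide
theorem get?_r : pieceToInt.get? "r" = some 4 := by decide
theorem get?_rr : pieceToInt.get? "rr" = some 5 := by decide
theorem get?_br : pieceToInt.get? "br" = some 6 := by decide

theorem get?_one_none (c : Char) (hb : c ≠ 'b') (hr : c ≠ 'r') :
    pieceToInt.get? (String.ofList [c]) = none := by
  simp [get?_ofList, hb, hr]

theorem get?_two_snd (p c : Char) (hb : c ≠ 'b') (hr : c ≠ 'r') :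
    pieceToInt.get? (String.ofList [p, c]) = none := by
  simp [get?_ofList, hb, hr]

theorem get?_two_fst (c d : Char) (hb : c ≠ 'b') (hr : c ≠ 'r') :
    pieceToInt.get? (String.ofList [c, d]) = none := by
  simp [get?_ofList, hb, hr]

theorem foldl_encStepB_none (l : List Char) : l.foldl encStepB none = none := by
  induction l with
  | nil => rfl
  | cons c l ih => simpa [encStepB] using ih

-- A's loop at a non-piece character: both shapes of the remaining list take the int() branch
theorem encLoopA_not_br (c : Char) (l : List Char) (hb : c ≠ 'b') (hr : c ≠ 'r') :
    encLoopA (c :: l) =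
      (PySem.Int.ofStr? (String.ofList [c])).bind fun n =>
        (encLoopA l).map (List.replicate n.toNat 0 ++ ·) := by
  cases l with
  | nil => simp [encLoopA, get?_one_none c hb hr]
  | cons c2 l2 => simp [encLoopA, get?_one_none c hb hr, get?_two_fst c c2 hb hr]

-- the loop invariant: B's fold with pending p and emitted prefix acc behaves like A's loop
-- run on p's character prepended to the remaining input
theorem inv (l : List Char) : ∀ (acc : List Int) (p : Option Char),
    (p = none ∨ p = some 'b' ∨ p = some 'r') →
    encFinishB (l.foldl encStepB (some (acc, p))) = (encLoopA (p.toList ++ l)).map (acc ++ ·) := by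
  induction l with
  | nil =>
    rintro acc p (rfl | rfl | rfl)
    · simp [encFinishB, encLoopA]
    · simp [encFinishB, encLoopA, get?_b]
    · simp [encFinishB, encLoopA, get?_r]
  | cons c l ih =>
    rintro acc p hp
    by_cases hcb : c = 'b'
    · subst hcb
      rcases hp with rfl | rfl | rfl
      · simpa [encStepB] using ih acc (some 'b') (by simp)
      · have hstep : encStepB (some (acc, some 'b')) 'b' = some (acc ++ [2], none) := by
          simp [encStepB, get?_bb]
        rw [List.foldl_cons, hstep, ih (acc ++ [2]) none (by simp)]
        simp only [Option.toList, List.nil_append, List.cons_append]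
        rw [show encLoopA ('b' :: 'b' :: l) = (encLoopA l).map ((2 : Int) :: ·) by simp [encLoopA, get?_bb]]
        cases encLoopA l <;> simp
      · have hstep : encStepB (some (acc, some 'r')) 'b' = some (acc ++ [3], none) := by
          simp [encStepB, get?_rb]
        rw [List.foldl_cons, hstep, ih (acc ++ [3]) none (by simp)]
        simp only [Option.toList, List.nil_append, List.cons_append]
        rw [show encLoopA ('r' :: 'b' :: l) = (encLoopA l).map ((3 : Int) :: ·) by simp [encLoopA, get?_rb]]
        cases encLoopA l <;> simp
    · by_cases hcr : c = 'r'
      · subst hcr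
        rcases hp with rfl | rfl | rfl
        · simpa [encStepB] using ih acc (some 'r') (by simp)
        · have hstep : encStepB (some (acc, some 'b')) 'r' = some (acc ++ [6], none) := by
            simp [encStepB, get?_br]
          rw [List.foldl_cons, hstep, ih (acc ++ [6]) none (by simp)]
          simp only [Option.toList, List.nil_append, List.cons_append]
          rw [show encLoopA ('b' :: 'r' :: l) = (encLoopA l).map ((6 : Int) :: ·) by simp [encLoopA, get?_br]]
          cases encLoopA l <;> simp
        · have hstep : encStepB (some (acc, some 'r')) 'r' = some (acc ++ [5], none) := by
            simp [encStepB, get?_rr]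
          rw [List.foldl_cons, hstep, ih (acc ++ [5]) none (by simp)]
          simp only [Option.toList, List.nil_append, List.cons_append]
          rw [show encLoopA ('r' :: 'r' :: l) = (encLoopA l).map ((5 : Int) :: ·) by simp [encLoopA, get?_rr]]
          cases encLoopA l <;> simp
      · -- c is neither 'b' nor 'r': the int() branch
        cases hint : PySem.Int.ofStr? (String.ofList [c]) with
        | none =>
          rcases hp with rfl | rfl | rfl <;>
          · rw [List.foldl_cons,
              show encStepB (some (acc, _)) c = none by
                simp [encStepB, hcb, hcr, hint, get?_b, get?_r],
              foldl_encStepB_none]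
            simp only [Option.toList, List.nil_append, List.cons_append]
            first
            | rw [encLoopA_not_br c l hcb hcr]; simp [hint, encFinishB]
            | · rw [show encLoopA ('b' :: c :: l) = (encLoopA (c :: l)).map ((1 : Int) :: ·) by
                    simp [encLoopA, get?_two_snd 'b' c hcb hcr, get?_b]]
                rw [encLoopA_not_br c l hcb hcr]
                simp [hint, encFinishB]
            | · rw [show encLoopA ('r' :: c :: l) = (encLoopA (c :: l)).map ((4 : Int) :: ·) by
                    simp [encLoopA, get?_two_snd 'r' c hcb hcr, get?_r]]
                rw [encLoopA_not_br c l hcb hcr]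
                simp [hint, encFinishB]
        | some n =>
          rcases hp with rfl | rfl | rfl
          · rw [List.foldl_cons,
              show encStepB (some (acc, none)) c = some (acc ++ List.replicate n.toNat 0, none) by
                simp [encStepB, hcb, hcr, hint],
              ih _ none (by simp)]
            simp only [Option.toList, List.nil_append]
            rw [encLoopA_not_br c l hcb hcr, hint]
            cases encLoopA l <;> simp
          · rw [List.foldl_cons,
              show encStepB (some (acc, some 'b')) c = some (acc ++ [1] ++ List.replicate n.toNat 0, none) by
                simp [encStepB, hcb, hcr, hint, get?_b],
              ih _ none (by simp)]
            simp only [Option.toList, List.nil_append, List.cons_append]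
            rw [show encLoopA ('b' :: c :: l) = (encLoopA (c :: l)).map ((1 : Int) :: ·) by
                simp [encLoopA, get?_two_snd 'b' c hcb hcr, get?_b],
              encLoopA_not_br c l hcb hcr, hint]
            cases encLoopA l <;> simp
          · rw [List.foldl_cons,
              show encStepB (some (acc, some 'r')) c = some (acc ++ [4] ++ List.replicate n.toNat 0, none) by
                simp [encStepB, hcb, hcr, hint, get?_r],
              ih _ none (by simp)]
            simp only [Option.toList, List.nil_append, List.cons_append]
            rw [show encLoopA ('r' :: c :: l) = (encLoopA (c :: l)).map ((4 : Int) :: ·) by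
                simp [encLoopA, get?_two_snd 'r' c hcb hcr, get?_r],
              encLoopA_not_br c l hcb hcr, hint]
            cases encLoopA l <;> simp

-- ===== VERDICT (by name: the statement is the Claim_ definition above) =====
theorem encode_board_state_spec : Claim_equal_encode_board_state := by
  intro s _ _
  unfold Spec_encode_board_state encode_board_state encode_board_state_alt
  rw [inv _ [] none (Or.inl rfl)]
  simp
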